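-- pv_equiv track=rewrite | github.com/jgruselius/misc | Python/index_color_balance.py | sum_chan
-- ===== SOURCE A (Python) =====
-- def sum_chan(chan_seqs):
--     counter = []  # Where length is equal to the longest seq in seqs
--     for seq in chan_seqs:
--         for i, chan in enumerate(seq):
--             if i == len(counter):
--                 counter.append([0, 0])
--             counter[i][0] += chan[0]
--             counter[i][1] += chan[1]
--     return counter
-- ===== SOURCE B (Python) =====
-- def sum_chan(chan_seqs):
--     n = max((len(s) for s in chan_seqs), default=0)
--     return [[sum(s[j][0] for s in chan_seqs if j < len(s)),
--              sum(s[j][1] for s in chan_seqs if j < len(s))]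
--             for j in range(n)]
-- ===== Notes on version B (the rewrite author's own statement) =====
-- stated objective: idiomatic
-- what changed: B builds the result column-by-column: it computes the longest sequence length once and, for each position, sums the two channel values over all sequences reaching that position via comprehensions, instead of A's sequence-by-sequence loop that grows and mutates a counter list in place.
import Mathlib
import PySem

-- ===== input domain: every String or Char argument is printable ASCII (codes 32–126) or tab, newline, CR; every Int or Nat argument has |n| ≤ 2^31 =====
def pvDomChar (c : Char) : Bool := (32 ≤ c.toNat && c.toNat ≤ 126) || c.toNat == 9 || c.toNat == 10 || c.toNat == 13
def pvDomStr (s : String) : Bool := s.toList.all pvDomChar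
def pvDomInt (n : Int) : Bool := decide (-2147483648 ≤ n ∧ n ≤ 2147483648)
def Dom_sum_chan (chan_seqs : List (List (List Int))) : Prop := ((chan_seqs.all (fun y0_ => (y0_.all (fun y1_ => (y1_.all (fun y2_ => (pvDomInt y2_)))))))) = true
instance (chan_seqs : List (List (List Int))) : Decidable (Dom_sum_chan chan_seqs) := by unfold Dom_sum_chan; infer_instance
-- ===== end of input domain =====

-- B recomputes the result column-by-column (position-wise sums over all sequences) instead of
-- A's sequence-by-sequence loop mutating a growing counter; same cost, more idiomatic.


-- ===== PORT A =====
-- counter[i][0] += chan[0]; counter[i][1] += chan[1] — two in-place updates, ported as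
-- pyGetD/pySetD (total forms; the indices i, 0, 1 are in range on every input Pre_ admits).
def sum_chan (chan_seqs : List (List (List Int))) : List (List Int) :=
  chan_seqs.foldl (fun counter seq =>
    (PySem.List.enumerate seq).foldl (fun counter p =>
      let i := p.1
      let chan := p.2
      let counter := if i = PySem.List.len counter then counter ++ [[0, 0]] else counter
      let counter := PySem.List.pySetD counter i
        (PySem.List.pySetD (PySem.List.pyGetD counter i [])
          0 (PySem.List.pyGetD (PySem.List.pyGetD counter i []) 0 0 + PySem.List.pyGetD chan 0 0))
      let counter := PySem.List.pySetD counter i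
        (PySem.List.pySetD (PySem.List.pyGetD counter i [])
          1 (PySem.List.pyGetD (PySem.List.pyGetD counter i []) 1 0 + PySem.List.pyGetD chan 1 0))
      counter) counter) []

-- ===== PORT B =====
-- Source B: n = max((len(s) for s in chan_seqs), default=0), then a comprehension over range(n)
-- summing channel 0 and channel 1 of each position's column.
def sum_chan_alt (chan_seqs : List (List (List Int))) : List (List Int) :=
  let n := (chan_seqs.map (fun s => s.length)).foldl max 0
  (List.range n).map (fun j =>
    [ ((chan_seqs.filter (fun s => j < s.length)).map (fun s => (s.getD j []).getD 0 0)).sum,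
      ((chan_seqs.filter (fun s => j < s.length)).map (fun s => (s.getD j []).getD 1 0)).sum ])

-- ===== PRECONDITION & SPEC =====
-- Pre_ excludes exactly the inputs where Python A raises IndexError: some channel entry has
-- fewer than two components (chan[0] / chan[1] out of range); B raises there too.
def Pre_sum_chan (chan_seqs : List (List (List Int))) : Prop :=
  ∀ seq ∈ chan_seqs, ∀ chan ∈ seq, 2 ≤ chan.length
instance (chan_seqs : List (List (List Int))) : Decidable (Pre_sum_chan chan_seqs) := by
  unfold Pre_sum_chan; infer_instance
def pvWitness_sum_chan : List (List (List Int)) := [[[1, 2], [3, 4]], [[10, 20]]]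

def Spec_sum_chan (chan_seqs : List (List (List Int))) (out : List (List Int)) : Prop := out = sum_chan_alt chan_seqs
instance (chan_seqs : List (List (List Int))) (out : List (List Int)) : Decidable (Spec_sum_chan chan_seqs out) := by unfold Spec_sum_chan; infer_instance

-- ===== CLAIM (what is proved, stated in full; the proofs are below) =====
def Claim_equal_sum_chan : Prop := ∀ (chan_seqs : List (List (List Int))), Dom_sum_chan chan_seqs → Pre_sum_chan chan_seqs → Spec_sum_chan chan_seqs (sum_chan chan_seqs)

-- ===== LEMMAS AND PROOFS =====

def addChan (p ch : List Int) : List Int :=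
  [p.getD 0 0 + ch.getD 0 0, p.getD 1 0 + ch.getD 1 0]
def stepA (counter : List (List Int)) (p : Int × List Int) : List (List Int) :=
      let i := p.1
      let chan := p.2
      let counter := if i = PySem.List.len counter then counter ++ [[0, 0]] else counter
      let counter := PySem.List.pySetD counter i
        (PySem.List.pySetD (PySem.List.pyGetD counter i [])
          0 (PySem.List.pyGetD (PySem.List.pyGetD counter i []) 0 0 + PySem.List.pyGetD chan 0 0))
      let counter := PySem.List.pySetD counter i
        (PySem.List.pySetD (PySem.List.pyGetD counter i [])
          1 (PySem.List.pyGetD (PySem.List.pyGetD counter i []) 1 0 + PySem.List.pyGetD chan 1 0))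
      counter

lemma pySetD_pair_zero (a b v : Int) :
    PySem.List.pySetD [a, b] 0 v = [v, b] := by
  simp [PySem.List.pySetD, PySem.List.pySet?, PySem.List.pyIdx?]

lemma pySetD_pair_one (a b v : Int) :
    PySem.List.pySetD [a, b] 1 v = [a, v] := by
  simp [PySem.List.pySetD, PySem.List.pySet?, PySem.List.pyIdx?]

lemma pyGetD_chan_zero (ch : List Int) : PySem.List.pyGetD ch 0 0 = ch.getD 0 0 := by
  simp [PySem.List.pyGetD_zero]

lemma pyGetD_chan_one (ch : List Int) : PySem.List.pyGetD ch 1 0 = ch.getD 1 0 := by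
  simp [PySem.List.pyGetD_ofNat']

lemma stepA_append (c : List (List Int)) (ch : List Int) :
    stepA c ((c.length : Int), ch) = c ++ [addChan [0, 0] ch] := by
  have hset : ∀ v w : List Int, (c ++ [v] : List (List Int)).set c.length w = c ++ [w] := by
    intro v w; simp [List.set_append_right]
  simp only [stepA, PySem.List.len_eq, if_true,
    PySem.List.pySetD_natCast, PySem.List.pyGetD_natCast]
  simp [hset, pySetD_pair_zero, pySetD_pair_one,
    pyGetD_chan_zero, pyGetD_chan_one, addChan, List.getD]

lemma stepA_set (c : List (List Int)) (k : Nat) (ch : List Int) (a b : Int)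
    (hk : k < c.length) (hcb : c.getD k [] = [a, b]) :
    stepA c ((k : Int), ch) = c.set k (addChan [a, b] ch) := by
  have hne : ¬ ((k : Int) = (c.length : Int)) := by omega
  have hg2 : ∀ v : List Int, (c.set k v)[k]? = some v := by
    intro v; simp [hk]
  simp only [stepA, PySem.List.len_eq, hne, if_false,
    PySem.List.pySetD_natCast, PySem.List.pyGetD_natCast, hcb]
  simp [hg2, List.set_set, pySetD_pair_zero, pySetD_pair_one,
    pyGetD_chan_zero, pyGetD_chan_one, addChan, List.getD]

def longAdd : List (List Int) → List (List Int) → List (List Int)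
  | c, [] => c
  | [], ch :: s => addChan [0, 0] ch :: longAdd [] s
  | p :: c, ch :: s => addChan p ch :: longAdd c s

def allTwo (c : List (List Int)) : Prop := ∀ p ∈ c, p.length = 2

lemma longAdd_nil (c : List (List Int)) : longAdd c [] = c := by cases c <;> rfl

lemma allTwo_longAdd (c s : List (List Int)) (h : allTwo c) : allTwo (longAdd c s) := by
  induction s generalizing c with
  | nil => rw [longAdd_nil]; exact h
  | cons ch s ih =>
    cases c with
    | nil =>
      intro p hp
      rcases List.mem_cons.1 hp with rfl | hp
      · rfl
      · exact ih [] (by intro q hq; cases hq) _ hp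
    | cons q c =>
      intro p hp
      rcases List.mem_cons.1 hp with rfl | hp
      · rfl
      · exact ih c (fun r hr => h r (List.mem_cons_of_mem _ hr)) _ hp

lemma inner_go (s : List (List Int)) : ∀ (k : Nat) (c : List (List Int)),
    k ≤ c.length → allTwo c →
    (PySem.List.enumerate s (k : Int)).foldl stepA c = c.take k ++ longAdd (c.drop k) s := by
  induction s with
  | nil =>
    intro k c hk h2
    simp [PySem.List.enumerate_nil, longAdd_nil, List.take_append_drop]
  | cons ch s ih =>
    intro k c hk h2
    rw [PySem.List.enumerate_cons, List.foldl_cons]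
    have hsucc : ((k : Int) + 1) = (((k + 1 : Nat)) : Int) := by push_cast; ring
    rw [hsucc]
    by_cases hkc : k = c.length
    · subst hkc
      rw [stepA_append]
      have h2' : allTwo (c ++ [addChan [0, 0] ch]) := by
        intro p hp
        rcases List.mem_append.1 hp with hp2 | hp2
        · exact h2 p hp2
        · rcases List.mem_cons.1 hp2 with rfl | h2x
          · rfl
          · cases h2x
      rw [show c.length + 1 = (c ++ [addChan [0,0] ch]).length by simp]
      rw [ih _ _ (le_refl _) h2']
      rw [List.take_of_length_le (by simp)]
      simp [longAdd]
    · have hklt : k < c.length := lt_of_le_of_ne hk hkc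
      obtain ⟨a, b, hab⟩ := List.length_eq_two.1 (h2 _ (List.getElem_mem hklt))
      have hgd : c.getD k [] = [a, b] := by
        simp [List.getD, List.getElem?_eq_getElem hklt, hab]
      rw [stepA_set c k ch a b hklt hgd]
      have h2' : allTwo (c.set k (addChan [a, b] ch)) := by
        intro p hp
        rcases List.mem_or_eq_of_mem_set hp with hp | hp
        · exact h2 p hp
        · subst hp; rfl
      rw [ih _ _ (by simp; omega) h2']
      rw [List.set_eq_take_append_cons_drop, if_pos hklt]
      rw [List.drop_eq_getElem_cons hklt, hab]
      have hlen : (List.take k c).length = k := by simp [hklt.le]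
      rw [List.take_append, List.drop_append, hlen]
      rw [List.take_of_length_le (le_trans hlen.le (Nat.le_succ k)),
        List.drop_of_length_le (le_trans hlen.le (Nat.le_succ k))]
      simp [longAdd]

def colv (css : List (List (List Int))) (j : Nat) (m : Nat) : Int :=
  ((css.filter (fun s => j < s.length)).map (fun s => (s.getD j []).getD m 0)).sum

def maxLenM (css : List (List (List Int))) : Nat :=
  (css.map (fun s => s.length)).foldl max 0

def rangeForm (css : List (List (List Int))) : List (List Int) :=
  (List.range (maxLenM css)).map (fun j => [colv css j 0, colv css j 1])

lemma map_range_getD (l : List (List Int)) (d : List Int) :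
    (List.range l.length).map (fun j => l.getD j d) = l := by
  apply List.ext_getElem
  · simp
  · intro i h1 h2
    simp [List.getD, List.getElem?_eq_getElem h2]

lemma longAdd_char (s : List (List Int)) : ∀ c : List (List Int),
    longAdd c s = (List.range (max c.length s.length)).map
      (fun j => if j < s.length then addChan (c.getD j [0,0]) (s.getD j []) else c.getD j [0,0]) := by
  induction s with
  | nil =>
    intro c
    rw [longAdd_nil]
    simp only [List.length_nil, Nat.max_zero, Nat.not_lt_zero, if_false]
    exact (map_range_getD c [0,0]).symm
  | cons ch s ih =>
    intro c
    have hr : ∀ n (f : Nat → List Int), (List.range (n+1)).map f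
        = f 0 :: (List.range n).map (fun j => f (j+1)) := by
      intro n f
      rw [List.range_succ_eq_map]
      simp [List.map_map, Function.comp]

    cases c with
    | nil =>
      show addChan [0,0] ch :: longAdd [] s = _
      rw [ih []]
      simp only [List.length_nil, Nat.zero_max, List.length_cons]
      rw [hr]
      simp
    | cons p c =>
      show addChan p ch :: longAdd c s = _
      rw [ih c]
      have : max (p :: c).length (ch :: s).length = (max c.length s.length) + 1 := by
        simp only [List.length_cons]; omega
      rw [this, hr]
      simp

lemma maxLenM_append (css : List (List (List Int))) (s : List (List Int)) :
    maxLenM (css ++ [s]) = max (maxLenM css) s.length := by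
  simp [maxLenM, List.foldl_append]

lemma len_le_maxLenM (css : List (List (List Int))) (s : List (List Int)) (h : s ∈ css) :
    s.length ≤ maxLenM css := by
  exact (PySem.List.le_foldl_max (css.map (fun t => t.length)) 0).2 _ (List.mem_map_of_mem h)

lemma colv_zero (css : List (List (List Int))) (j m : Nat) (h : maxLenM css ≤ j) :
    colv css j m = 0 := by
  unfold colv
  have : css.filter (fun s => decide (j < s.length)) = [] := by
    apply List.filter_eq_nil_iff.2
    intro s hs
    simp only [decide_eq_true_eq, Nat.not_lt]
    exact le_trans (len_le_maxLenM css s hs) h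
  rw [this]; rfl

lemma colv_append (css : List (List (List Int))) (s : List (List Int)) (j m : Nat) :
    colv (css ++ [s]) j m
      = colv css j m + (if j < s.length then (s.getD j []).getD m 0 else 0) := by
  unfold colv
  rw [List.filter_append, List.map_append, List.sum_append]
  by_cases h : j < s.length <;> simp [h]

lemma rangeForm_append (css : List (List (List Int))) (s : List (List Int)) :
    longAdd (rangeForm css) s = rangeForm (css ++ [s]) := by
  rw [longAdd_char]
  have hlen : (rangeForm css).length = maxLenM css := by simp [rangeForm]
  rw [hlen]
  rw [show rangeForm (css ++ [s]) = (List.range (max (maxLenM css) s.length)).map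
      (fun j => [colv (css ++ [s]) j 0, colv (css ++ [s]) j 1]) by
    unfold rangeForm; rw [maxLenM_append]]
  apply List.map_congr_left
  intro j hj
  rw [List.mem_range] at hj
  have hgd : (rangeForm css).getD j [0,0]
      = if j < maxLenM css then [colv css j 0, colv css j 1] else [0,0] := by
    by_cases h : j < maxLenM css
    · rw [if_pos h]
      exact PySem.List.getD_map_range _ _ _ _ h
    · rw [if_neg h]
      have : (rangeForm css).length ≤ j := by omega
      simp [List.getD, List.getElem?_eq_none this]
  rw [hgd]
  by_cases hs : j < s.length
  · rw [if_pos hs]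
    by_cases h : j < maxLenM css
    · rw [if_pos h]
      simp [addChan, colv_append, hs]
    · rw [if_neg h]
      have h0 := colv_zero css j 0 (by omega)
      have h1 := colv_zero css j 1 (by omega)
      simp [addChan, colv_append, hs, h0, h1]
  · rw [if_neg hs]
    have h : j < maxLenM css := by omega
    rw [if_pos h]
    simp [colv_append, hs]

lemma foldl_longAdd_eq (css : List (List (List Int))) :
    css.foldl longAdd [] = rangeForm css := by
  induction css using List.reverseRecOn with
  | nil => rfl
  | append_singleton css s ih =>
    rw [List.foldl_append, List.foldl_cons, List.foldl_nil, ih, rangeForm_append]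

lemma outer_fold (css : List (List (List Int))) : ∀ c : List (List Int), allTwo c →
    css.foldl (fun c s => (PySem.List.enumerate s).foldl stepA c) c = css.foldl longAdd c
      ∧ allTwo (css.foldl longAdd c) := by
  induction css with
  | nil => exact fun c h => ⟨rfl, h⟩
  | cons s css ih =>
    intro c h
    have h1 : (PySem.List.enumerate s).foldl stepA c = longAdd c s := by
      have := inner_go s 0 c (Nat.zero_le _) h
      simpa using this
    refine ⟨?_, ?_⟩
    · rw [List.foldl_cons, List.foldl_cons, h1]
      exact (ih _ (allTwo_longAdd c s h)).1
    · rw [List.foldl_cons]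
      exact (ih _ (allTwo_longAdd c s h)).2

-- ===== VERDICT (by name: the statement is the Claim_ definition above) =====
theorem sum_chan_spec : Claim_equal_sum_chan := by
  intro css _ _
  show sum_chan css = sum_chan_alt css
  have hA : sum_chan css
      = css.foldl (fun c s => (PySem.List.enumerate s).foldl stepA c) [] := rfl
  have hB : sum_chan_alt css = rangeForm css := rfl
  rw [hA, hB, (outer_fold css [] (by intro p hp; cases hp)).1, foldl_longAdd_eq]
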